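-- pv_equiv track=rewrite | github.com/olidv/Lothon | src/main/lothon/stats/combinatoria.py | count_sequencias
-- ===== SOURCE A (Python) =====
-- def count_sequencias(bolas: tuple[int, ...]) -> int:
--     # valida os parametros:
--     if bolas is None or len(bolas) == 0:
--         return 0
--
--     # eh preciso ordenar a tupla para verificar se ha sequencia:
--     bolas: tuple[int, ...] = tuple(sorted(bolas))
--
--     qtd_sequencias: int = 0
--     seq_posterior: int = -1
--     for num in bolas:
--         if num == seq_posterior:
--             qtd_sequencias += 1
--         seq_posterior = num + 1
--
--     return qtd_sequencias
-- ===== SOURCE B (Python) =====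
-- def count_sequencias(bolas):
--     # valida os parametros:
--     if bolas is None or len(bolas) == 0:
--         return 0
--     s = set(bolas)
--     return sum(1 for v in s if v - 1 in s)
-- ===== Notes on version B (the rewrite author's own statement) =====
-- stated objective: idiomatic
-- what changed: Replaces sort-then-scan with seq_posterior accumulator by a set-membership count of values whose predecessor is also present.
-- intended difference: On inputs whose minimum element is -1, A's sentinel seq_posterior = -1 spuriously matches the first sorted element and A returns one more than the true count of consecutive adjacencies; B returns the intended count. — e.g. on count_sequencias([-1]): A returns 1, B returns 0
import Mathlib
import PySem

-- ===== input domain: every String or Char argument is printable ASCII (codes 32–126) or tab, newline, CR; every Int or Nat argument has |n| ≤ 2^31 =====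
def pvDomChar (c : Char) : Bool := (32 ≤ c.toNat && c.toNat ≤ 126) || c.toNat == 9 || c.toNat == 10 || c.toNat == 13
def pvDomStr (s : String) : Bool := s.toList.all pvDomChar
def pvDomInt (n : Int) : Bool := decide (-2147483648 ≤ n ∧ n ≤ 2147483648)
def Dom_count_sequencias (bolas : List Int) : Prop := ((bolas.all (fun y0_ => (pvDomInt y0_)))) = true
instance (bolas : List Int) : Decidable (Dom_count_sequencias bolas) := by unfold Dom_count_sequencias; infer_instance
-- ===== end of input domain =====

-- B replaces A's sort-then-scan (seq_posterior accumulator) by a set-membership count of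
-- values whose predecessor is also present; on inputs with minimum -1 A's sentinel
-- spuriously fires and B differs (see D_ below).


-- ===== PORT A =====
def count_sequencias (bolas : List Int) : Int :=
  if bolas.length = 0 then 0
  else
    let sortedBolas := PySem.List.sorted bolas (fun x => x) false
    let st := sortedBolas.foldl
      (fun (st : Int × Int) num =>
        (if num = st.2 then st.1 + 1 else st.1, num + 1))
      (0, -1)
    st.1

-- ===== PORT B =====
def count_sequencias_alt (bolas : List Int) : Int :=
  if bolas.length = 0 then 0
  else
    let s : PySem.Set Int := PySem.Set.ofList bolas
    ((s.countP (fun v => PySem.Set.contains s (v - 1))) : Int)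

-- ===== PRECONDITION & SPEC =====
-- On inputs whose minimum element is -1, A's sentinel seq_posterior = -1 matches the first
-- sorted element and A returns one more than the count of consecutive adjacencies; B returns
-- the intended count.
def D_count_sequencias (bolas : List Int) : Prop :=
  (-1 : Int) ∈ bolas ∧ ∀ x ∈ bolas, (-1 : Int) ≤ x
instance (bolas : List Int) : Decidable (D_count_sequencias bolas) := by
  unfold D_count_sequencias; infer_instance

def Spec_count_sequencias (bolas : List Int) (out : Int) : Prop :=
  ¬ D_count_sequencias bolas → out = count_sequencias_alt bolas
instance (bolas : List Int) (out : Int) : Decidable (Spec_count_sequencias bolas out) := by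
  unfold Spec_count_sequencias; infer_instance

def pvDiffWitness_count_sequencias : List Int := [-1]
def pvDiffWitnessOut_count_sequencias : Int × Int := (1, 0)

-- ===== CLAIM (what is proved, stated in full; the proofs are below) =====
def Claim_unchanged_count_sequencias : Prop :=
  ∀ (bolas : List Int), Dom_count_sequencias bolas →
    Spec_count_sequencias bolas (count_sequencias bolas)
def Claim_changed_count_sequencias : Prop :=
  Dom_count_sequencias (pvDiffWitness_count_sequencias) ∧
  D_count_sequencias (pvDiffWitness_count_sequencias) ∧
  count_sequencias (pvDiffWitness_count_sequencias) = pvDiffWitnessOut_count_sequencias.1 ∧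
  count_sequencias_alt (pvDiffWitness_count_sequencias) = pvDiffWitnessOut_count_sequencias.2 ∧
  pvDiffWitnessOut_count_sequencias.1 ≠ pvDiffWitnessOut_count_sequencias.2
def Claim_exact_count_sequencias : Prop :=
  ∀ (bolas : List Int), Dom_count_sequencias bolas → D_count_sequencias bolas →
    count_sequencias bolas ≠ count_sequencias_alt bolas

-- ===== LEMMAS AND PROOFS =====

-- the order-free count both programs compute: distinct values whose predecessor is present
def pvC (l : List Int) : Int :=
  ((l.toFinset.filter (fun v => v - 1 ∈ l.toFinset)).card : Int)

theorem pvC_step (n : Int) (t : List Int) (hmin : ∀ x ∈ t, n ≤ x)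
    (hsort : t.Pairwise (· ≤ ·)) :
    pvC (n :: t) = (if t.head? = some (n + 1) then 1 else 0) + pvC t := by
  have hheadle : ∀ h, t.head? = some h → ∀ x ∈ t, h ≤ x := by
    intro h hh x hx
    cases t with
    | nil => simp at hh
    | cons a t' =>
      simp only [List.head?_cons, Option.some.injEq] at hh
      subst hh
      rcases List.mem_cons.1 hx with h | h
      · exact le_of_eq h.symm
      · exact (List.pairwise_cons.1 hsort).1 x h
  by_cases hmem : n ∈ t
  · -- duplicate head: the finset does not change and t's head is n, not n+1
    have hfin : (n :: t).toFinset = t.toFinset := by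
      rw [List.toFinset_cons, Finset.insert_eq_self.2 (List.mem_toFinset.2 hmem)]
    have hhead : ¬ t.head? = some (n + 1) := by
      intro hh
      have := hheadle _ hh n hmem
      omega
    rw [if_neg hhead]
    unfold pvC
    rw [hfin]
    ring
  · have hnS : n ∉ t.toFinset := fun h => hmem (List.mem_toFinset.1 h)
    have hfin : (n :: t).toFinset = insert n t.toFinset := List.toFinset_cons
    have hout : (n - 1) ∉ insert n t.toFinset := by
      intro h
      rcases Finset.mem_insert.1 h with h | h
      · omega
      · exact absurd (hmin _ (List.mem_toFinset.1 h)) (by omega)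
    have hhead : t.head? = some (n + 1) ↔ (n + 1) ∈ t.toFinset := by
      constructor
      · intro hh; exact List.mem_toFinset.2 (List.mem_of_mem_head? hh)
      · intro hm
        have hm' := List.mem_toFinset.1 hm
        cases t with
        | nil => simp at hm'
        | cons a t' =>
          have h1 : a ≤ n + 1 := hheadle a rfl _ hm'
          have h2 : n ≤ a := hmin a List.mem_cons_self
          have h3 : a ≠ n := fun h => hmem (h ▸ List.mem_cons_self)
          simp only [List.head?_cons, Option.some.injEq]
          omega
    unfold pvC
    rw [hfin, Finset.filter_insert, if_neg (by simpa using hout)]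
    have hcongr : t.toFinset.filter (fun v => v - 1 ∈ insert n t.toFinset)
        = t.toFinset.filter (fun v => v = n + 1 ∨ v - 1 ∈ t.toFinset) := by
      apply Finset.filter_congr
      intro v _
      simp only [Finset.mem_insert]
      constructor
      · rintro (h | h); · left; omega
        · right; exact h
      · rintro (h | h); · left; omega
        · right; exact h
    rw [hcongr, Finset.filter_or, Finset.filter_eq']
    have hdisj : Disjoint (if n + 1 ∈ t.toFinset then {n + 1} else (∅ : Finset Int))
        (t.toFinset.filter (fun v => v - 1 ∈ t.toFinset)) := by
      split_ifs
      · simp only [Finset.disjoint_singleton_left, Finset.mem_filter, not_and]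
        intro _ h
        exact absurd h (by simpa using hnS)
      · exact Finset.disjoint_empty_left _
    rw [Finset.card_union_of_disjoint hdisj]
    by_cases hm : (n + 1) ∈ t.toFinset
    · rw [if_pos (hhead.2 hm), if_pos hm]
      simp only [Finset.card_singleton]; push_cast; ring
    · rw [if_neg (fun hh => hm (hhead.1 hh)), if_neg hm]
      simp

theorem pvFoldA (l : List Int) (hs : l.Pairwise (· ≤ ·)) :
    ∀ (q s : Int),
      (l.foldl (fun (st : Int × Int) num =>
          (if num = st.2 then st.1 + 1 else st.1, num + 1)) (q, s)).1
        = q + (if l.head? = some s then 1 else 0) + pvC l := by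
  induction l with
  | nil => intro q s; simp [pvC]
  | cons n t ih =>
    intro q s
    have hmin : ∀ x ∈ t, n ≤ x := fun x hx => (List.pairwise_cons.1 hs).1 x hx
    rw [List.foldl_cons, ih (List.pairwise_cons.1 hs).2,
        pvC_step n t hmin (List.pairwise_cons.1 hs).2]
    simp only [List.head?_cons, Option.some.injEq]
    by_cases h : n = s <;> simp [h] <;> ring

theorem pvB_eq_pvC (bolas : List Int) : count_sequencias_alt bolas = pvC bolas := by
  unfold count_sequencias_alt pvC
  rcases eq_or_ne bolas [] with rfl | hne
  · simp
  · rw [if_neg (by simp [hne])]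
    have hfin : (PySem.Set.ofList bolas).toFinset = bolas.toFinset := by
      ext x; simp [PySem.Set.mem_ofList]
    have hp : ∀ v : Int, (PySem.Set.contains (PySem.Set.ofList bolas) (v - 1))
        = decide (v - 1 ∈ bolas.toFinset) := by
      intro v
      simp [PySem.Set.contains, PySem.Set.mem_ofList]
    show ((List.countP (fun v => (PySem.Set.ofList bolas).contains (v - 1))
        (PySem.Set.ofList bolas) : Nat) : Int) = _
    simp only [hp]
    have : bolas.toFinset.filter (fun v => v - 1 ∈ bolas.toFinset)
        = ((PySem.Set.ofList bolas).filter (fun v => decide (v - 1 ∈ bolas.toFinset))).toFinset := by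
      rw [List.toFinset_filter, hfin]
      simp
    rw [this, List.toFinset_card_of_nodup ((PySem.Set.nodup_ofList bolas).filter _),
        List.countP_eq_length_filter]

theorem pvHead_sorted_min (bolas : List Int) (h : bolas ≠ []) :
    ((PySem.List.sorted bolas (fun x => x) false).head? = some (-1 : Int))
      ↔ D_count_sequencias bolas := by
  have hne : PySem.List.sorted bolas (fun x => x) false ≠ [] := by
    rw [Ne, PySem.List.sorted_eq_nil_iff]; exact h
  obtain ⟨m, t, hm⟩ := List.exists_cons_of_ne_nil hne
  rw [hm, List.head?_cons]
  have hmem : m ∈ bolas := by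
    rw [← PySem.List.mem_sorted (key := fun x => x) (rev := false), hm]
    exact List.mem_cons_self
  have hle : ∀ y ∈ bolas, m ≤ y := PySem.List.key_head_sorted_le bolas (fun x => x) hm
  constructor
  · rintro h'
    simp only [Option.some.injEq] at h'
    subst h'
    exact ⟨hmem, hle⟩
  · rintro ⟨h1, h2⟩
    have := hle _ h1
    have := h2 m hmem
    simp only [Option.some.injEq]
    omega

theorem pvA_eq (bolas : List Int) (h : bolas ≠ []) :
    count_sequencias bolas
      = (if D_count_sequencias bolas then 1 else 0) + pvC bolas := by
  unfold count_sequencias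
  rw [if_neg (by simp [h])]
  have hpw : (PySem.List.sorted bolas (fun x => x) false).Pairwise (· ≤ ·) :=
    PySem.List.sorted_pairwise bolas (fun x => x)
  show (List.foldl _ ((0 : Int), (-1 : Int)) _).1 = _
  rw [pvFoldA _ hpw 0 (-1)]
  have hC : pvC (PySem.List.sorted bolas (fun x => x) false) = pvC bolas := by
    unfold pvC
    rw [List.toFinset_eq_of_perm _ _ (PySem.List.sorted_perm bolas (fun x => x) false)]
  rw [hC, zero_add]
  congr 1
  rw [if_congr (pvHead_sorted_min bolas h) rfl rfl]

-- ===== VERDICT (by name: the statement is the Claim_ definition above) =====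
theorem count_sequencias_spec : Claim_unchanged_count_sequencias := by
  intro bolas _ hD
  rcases eq_or_ne bolas [] with rfl | hne
  · rfl
  · rw [pvA_eq bolas hne, if_neg hD, pvB_eq_pvC, zero_add]

theorem count_sequencias_changed : Claim_changed_count_sequencias := by
  unfold Claim_changed_count_sequencias; decide

theorem count_sequencias_tight : Claim_exact_count_sequencias := by
  intro bolas _ hD
  have hne : bolas ≠ [] := by rintro rfl; exact (List.not_mem_nil (a := (-1:Int))).elim hD.1
  rw [pvA_eq bolas hne, if_pos hD, pvB_eq_pvC]
  omega
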